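-- pv_equiv track=rewrite | github.com/automatic-code-review/acr-cpp-using-namespace | src/review.py | get_last_include_position
-- ===== SOURCE A (Python) =====
-- def get_last_include_position(lines):
--     include_pos = -1
--
--     pos = 0
--     for line in lines:
--         if line.startswith("#include ") and ".moc" not in line:
--             include_pos = pos
--
--         pos += 1
--
--     return include_pos
-- ===== SOURCE B (Python) =====
-- def get_last_include_position(lines):
--     lines = list(lines)
--     for i in range(len(lines) - 1, -1, -1):
--         if lines[i].startswith("#include ") and ".moc" not in lines[i]:
--             return i
--     return -1
-- ===== Notes on version B (the rewrite author's own statement) =====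
-- stated objective: simpler
-- what changed: Replaces the forward sweep that keeps overwriting include_pos with a reverse scan that returns at the first matching line from the end.
import Mathlib
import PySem

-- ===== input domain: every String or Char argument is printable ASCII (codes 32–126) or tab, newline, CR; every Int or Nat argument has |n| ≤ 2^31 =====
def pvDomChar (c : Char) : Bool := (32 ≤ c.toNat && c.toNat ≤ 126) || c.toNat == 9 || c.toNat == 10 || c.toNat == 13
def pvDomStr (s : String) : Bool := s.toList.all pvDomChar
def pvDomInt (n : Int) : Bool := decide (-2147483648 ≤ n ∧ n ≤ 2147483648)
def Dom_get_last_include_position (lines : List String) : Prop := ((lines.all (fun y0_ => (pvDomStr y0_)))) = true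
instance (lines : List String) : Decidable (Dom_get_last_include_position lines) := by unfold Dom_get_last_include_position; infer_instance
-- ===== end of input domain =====

-- B replaces A's forward sweep (overwriting include_pos) with a reverse scan returning the first match from the end; objective: simpler.

-- ===== PORT A =====
-- the loop state is (include_pos, pos)
def get_last_include_position (lines : List String) : Int :=
  (lines.foldl
    (fun (st : Int × Int) line =>
      ((if PySem.Str.startswith line "#include " && !(PySem.Str.isIn ".moc" line) then st.2 else st.1),
       st.2 + 1))
    (-1, 0)).1

-- ===== PORT B =====
-- scan lines.reverse carrying the current index i (= len-1 downwards), returning at the first match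
def pvAltAux (xs : List String) (i : Int) : Int :=
  match xs with
  | [] => -1
  | l :: ls =>
    if PySem.Str.startswith l "#include " && !(PySem.Str.isIn ".moc" l) then i
    else pvAltAux ls (i - 1)

def get_last_include_position_alt (lines : List String) : Int :=
  pvAltAux lines.reverse ((lines.length : Int) - 1)

-- ===== PRECONDITION & SPEC =====
def Spec_get_last_include_position (lines : List String) (out : Int) : Prop := out = get_last_include_position_alt lines
instance (lines : List String) (out : Int) : Decidable (Spec_get_last_include_position lines out) := by unfold Spec_get_last_include_position; infer_instance

-- ===== CLAIM (what is proved, stated in full; the proofs are below) =====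
def Claim_equal_get_last_include_position : Prop := ∀ (lines : List String), Dom_get_last_include_position lines → Spec_get_last_include_position lines (get_last_include_position lines)

-- ===== LEMMAS AND PROOFS =====

def pvStep : Int × Int → String → Int × Int :=
  fun st line =>
    ((if PySem.Str.startswith line "#include " && !(PySem.Str.isIn ".moc" line) then st.2 else st.1),
     st.2 + 1)

lemma pvA_eq (lines : List String) :
    get_last_include_position lines = (lines.foldl pvStep (-1, 0)).1 := rfl

lemma pvFoldl_snd (lines : List String) (st : Int × Int) :
    (lines.foldl pvStep st).2 = st.2 + lines.length := by
  induction lines generalizing st with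
  | nil => simp
  | cons l ls ih =>
    simp only [List.foldl_cons, ih, pvStep, List.length_cons]
    push_cast
    omega

-- A on lines ++ [l]
lemma pvA_snoc (ls : List String) (l : String) :
    get_last_include_position (ls ++ [l]) =
      if PySem.Str.startswith l "#include " && !(PySem.Str.isIn ".moc" l) then (ls.length : Int)
      else get_last_include_position ls := by
  simp only [pvA_eq, List.foldl_append, List.foldl_cons, List.foldl_nil, pvStep]
  rw [pvFoldl_snd]
  simp

-- B on lines ++ [l]
lemma pvB_snoc (ls : List String) (l : String) :
    get_last_include_position_alt (ls ++ [l]) =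
      if PySem.Str.startswith l "#include " && !(PySem.Str.isIn ".moc" l) then (ls.length : Int)
      else get_last_include_position_alt ls := by
  simp only [get_last_include_position_alt, List.reverse_append, List.reverse_cons,
    List.reverse_nil, List.nil_append, List.cons_append, List.length_append, List.length_cons,
    List.length_nil, pvAltAux]
  push_cast
  split
  · ring_nf
  · ring_nf

-- ===== VERDICT (by name: the statement is the Claim_ definition above) =====
theorem get_last_include_position_spec : Claim_equal_get_last_include_position := by
  intro lines _
  unfold Spec_get_last_include_position
  clear ‹Dom_get_last_include_position lines›
  induction lines using List.reverseRecOn with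
  | nil => rfl
  | append_singleton ls l ih =>
    rw [pvA_snoc, pvB_snoc, ih]
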